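-- pv_equiv track=rewrite | github.com/cobbler/cobbler | cobbler/modules/serializer_file.py | filter_upgrade_duplicates
-- ===== SOURCE A (Python) =====
-- def filter_upgrade_duplicates(file_list):
--     """
--     In a set of files, some ending with .json, some not, return
--     the list of files with the .json ones taking priority over
--     the ones that are not.
--     """
--     bases = {}
--     for f in file_list:
--         basekey = f.replace(".json", "")
--         if f.endswith(".json"):
--             bases[basekey] = f
--         else:
--             lookup = bases.get(basekey, "")
--             if not lookup.endswith(".json"):
--                 bases[basekey] = f
--     return bases.values()
-- ===== SOURCE B (Python) =====
-- def filter_upgrade_duplicates(file_list):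
--     """
--     Two-pass re-implementation: first group files by their basekey
--     (everything with every ".json" removed), then pick one file per group:
--     the last .json file if the group has any, else the last file.
--     """
--     groups = {}
--     for f in file_list:
--         basekey = f.replace(".json", "")
--         groups.setdefault(basekey, []).append(f)
--     result = []
--     for group in groups.values():
--         json_files = [g for g in group if g.endswith(".json")]
--         chosen = json_files if json_files else group
--         result.append(chosen[-1])
--     return result
-- ===== Notes on version B (the rewrite author's own statement) =====
-- stated objective: alternative
-- what changed: Replaces A's single conditional-overwrite pass over a basekey-to-file dict by a two-pass grouping decomposition: first group files by basekey, then select per group the last .json file if any, else the last file (A returns a dict_values view, B a list of the same strings in the same order).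
import Mathlib
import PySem

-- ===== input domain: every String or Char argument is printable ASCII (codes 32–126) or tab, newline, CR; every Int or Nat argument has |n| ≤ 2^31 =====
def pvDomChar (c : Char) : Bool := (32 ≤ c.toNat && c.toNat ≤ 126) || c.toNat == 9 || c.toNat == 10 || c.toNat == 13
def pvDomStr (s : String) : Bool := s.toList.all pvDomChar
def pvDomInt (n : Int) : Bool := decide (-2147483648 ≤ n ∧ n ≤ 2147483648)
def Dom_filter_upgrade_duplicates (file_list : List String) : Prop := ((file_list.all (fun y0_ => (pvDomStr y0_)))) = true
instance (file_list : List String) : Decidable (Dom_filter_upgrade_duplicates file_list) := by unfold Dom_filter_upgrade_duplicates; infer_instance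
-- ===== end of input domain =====

-- B replaces A's one-pass conditional-overwrite dict by a two-pass group-then-select decomposition (alternative, same cost).

-- ===== PORT A =====
def filter_upgrade_duplicates (file_list : List String) : List String :=
  (file_list.foldl (fun bases f =>
      let basekey := PySem.Str.replace f ".json" ""
      if PySem.Str.endswith f ".json" then
        bases.insert basekey f
      else
        let lookup := bases.getD basekey ""
        if !(PySem.Str.endswith lookup ".json") then bases.insert basekey f
        else bases)
    PySem.Dict.empty).values

-- ===== PORT B =====
-- select one file from a group: the last .json file if any, else the last file
-- (every group built by filter_upgrade_duplicates_alt is nonempty, so the .getD "" default of chosen[-1] is unreachable)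
def pvPick (group : List String) : String :=
  let json_files := group.filter (fun g => PySem.Str.endswith g ".json")
  let chosen := if json_files.isEmpty then group else json_files
  (PySem.List.pyGet? chosen (-1)).getD ""

def filter_upgrade_duplicates_alt (file_list : List String) : List String :=
  let groups : PySem.Dict String (List String) :=
    file_list.foldl (fun g f =>
      let basekey := PySem.Str.replace f ".json" ""
      g.insert basekey (g.getD basekey [] ++ [f])) PySem.Dict.empty
  groups.values.foldl (fun result group => result ++ [pvPick group]) []

-- ===== PRECONDITION & SPEC =====
def Spec_filter_upgrade_duplicates (file_list : List String) (out : List String) : Prop := out = filter_upgrade_duplicates_alt file_list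
instance (file_list : List String) (out : List String) : Decidable (Spec_filter_upgrade_duplicates file_list out) := by unfold Spec_filter_upgrade_duplicates; infer_instance

-- ===== CLAIM (what is proved, stated in full; the proofs are below) =====
def Claim_equal_filter_upgrade_duplicates : Prop := ∀ (file_list : List String), Dom_filter_upgrade_duplicates file_list → Spec_filter_upgrade_duplicates file_list (filter_upgrade_duplicates file_list)

-- ===== LEMMAS AND PROOFS =====

-- map pvPick over the values of a dict of groups
def pvMapV (d : PySem.Dict String (List String)) : PySem.Dict String String :=
  PySem.Dict.mk (d.items.map (fun p => (p.1, pvPick p.2)))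

def pvStepA (bases : PySem.Dict String String) (f : String) : PySem.Dict String String :=
  let basekey := PySem.Str.replace f ".json" ""
  if PySem.Str.endswith f ".json" then
    bases.insert basekey f
  else
    let lookup := bases.getD basekey ""
    if !(PySem.Str.endswith lookup ".json") then bases.insert basekey f
    else bases

def pvStepB (g : PySem.Dict String (List String)) (f : String) : PySem.Dict String (List String) :=
  let basekey := PySem.Str.replace f ".json" ""
  g.insert basekey (g.getD basekey [] ++ [f])

theorem pvGetLast (l : List String) (x : String) :
    PySem.List.pyGet? (l ++ [x]) (-1) = some x := by
  simp [PySem.List.pyGet?, PySem.List.pyIdx?]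

theorem pvPick_eq (v : List String) :
    pvPick v = (PySem.List.pyGet? (if (v.filter (fun g => PySem.Str.endswith g ".json")).isEmpty = true
      then v else v.filter (fun g => PySem.Str.endswith g ".json")) (-1)).getD "" := rfl

theorem pvLast_mem (v : List String) :
    (PySem.List.pyGet? v (-1)).getD "" = "" ∨ ((PySem.List.pyGet? v (-1)).getD "") ∈ v := by
  rcases v.eq_nil_or_concat with rfl | ⟨l, x, rfl⟩
  · left; rfl
  · right
    rw [List.concat_eq_append, pvGetLast]
    simp

theorem pvPick_last (l : List String) (x : String)
    (h : (l.filter (fun g => PySem.Str.endswith g ".json")).isEmpty = true ∨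
         PySem.Str.endswith x ".json" = true) :
    pvPick (l ++ [x]) = x := by
  by_cases hx : PySem.Str.endswith x ".json" = true
  · have hx' : PySem.Chars.endswith x.toList ['.','j','s','o','n'] = true := by simpa using hx
    have hfl : (l ++ [x]).filter (fun g => PySem.Str.endswith g ".json")
        = l.filter (fun g => PySem.Str.endswith g ".json") ++ [x] := by
      simp [List.filter_append, hx']
    rw [pvPick_eq, hfl, if_neg (by simp), pvGetLast]
    rfl
  · have hx' : PySem.Chars.endswith x.toList ['.','j','s','o','n'] = false := by
      simpa using hx
    rcases h with h | h
    · have hl := List.isEmpty_iff.mp h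
      have hfl : (l ++ [x]).filter (fun g => PySem.Str.endswith g ".json") = [] := by
        rw [List.filter_append, hl, List.nil_append]
        simp [hx']
      rw [pvPick_eq, hfl, if_pos (show ([] : List String).isEmpty = true from rfl), pvGetLast]
      rfl
    · exact absurd h hx

theorem pvPick_json_iff (v : List String) :
    PySem.Str.endswith (pvPick v) ".json" = !(v.filter (fun g => PySem.Str.endswith g ".json")).isEmpty := by
  by_cases hE : (v.filter (fun g => PySem.Str.endswith g ".json")).isEmpty = true
  · rw [pvPick_eq, if_pos hE, hE]
    have hall := List.filter_eq_nil_iff.mp (List.isEmpty_iff.mp hE)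
    rcases pvLast_mem v with h | h
    · rw [h]; decide
    · simpa using hall _ h
  · have hE' : (v.filter (fun g => PySem.Str.endswith g ".json")).isEmpty = false := by
      simpa using hE
    rw [pvPick_eq, if_neg hE, hE']
    rcases (v.filter (fun g => PySem.Str.endswith g ".json")).eq_nil_or_concat with hnil | ⟨l, x, hc⟩
    · rw [hnil] at hE'; simp at hE'
    · rw [List.concat_eq_append] at hc
      have hx : x ∈ v.filter (fun g => PySem.Str.endswith g ".json") := by rw [hc]; simp
      have hxj := (List.mem_filter.mp hx).2
      rw [hc, pvGetLast]
      simpa using hxj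

theorem pvPick_append_not_json (v : List String) (f : String)
    (hf : PySem.Str.endswith f ".json" = false)
    (hv : (v.filter (fun g => PySem.Str.endswith g ".json")).isEmpty = false) :
    pvPick (v ++ [f]) = pvPick v := by
  have hf' : PySem.Chars.endswith f.toList ['.','j','s','o','n'] = false := by simpa using hf
  have hfl : (v ++ [f]).filter (fun g => PySem.Str.endswith g ".json")
      = v.filter (fun g => PySem.Str.endswith g ".json") := by
    simp [List.filter_append, hf']
  rw [pvPick_eq, pvPick_eq, hfl, hv]
  rfl

theorem pvItems_mapV (d : PySem.Dict String (List String)) :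
    (pvMapV d).items = d.items.map (fun p => (p.1, pvPick p.2)) := rfl

theorem pvContains_mapV (g : PySem.Dict String (List String)) (k : String) :
    (pvMapV g).contains k = g.contains k := by
  simp only [pvMapV, PySem.Dict.contains]
  rw [List.any_map]
  rfl

theorem pvGet?_mapV (g : PySem.Dict String (List String)) (k : String) :
    (pvMapV g).get? k = (g.get? k).map pvPick := by
  simp only [pvMapV, PySem.Dict.get?, List.find?_map]
  rw [show ((fun (p : String × String) => p.1 == k) ∘ (fun (p : String × List String) => (p.1, pvPick p.2)))
      = (fun (p : String × List String) => p.1 == k) from rfl]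
  cases h : List.find? (fun (p : String × List String) => p.1 == k) g.items <;> simp

theorem pvStep_comm (g : PySem.Dict String (List String)) (f : String)
    (hnd : g.keys.Nodup) :
    pvMapV (pvStepB g f) = pvStepA (pvMapV g) f := by
  unfold pvStepA pvStepB
  set k := PySem.Str.replace f ".json" "" with hk
  by_cases hc : g.contains k = true
  · -- key already present: both sides rewrite in place
    obtain ⟨v, hv⟩ : ∃ v, g.get? k = some v := by
      have := PySem.Dict.contains_eq_isSome_get? g k
      rw [hc] at this
      exact Option.isSome_iff_exists.mp this.symm
    have hvD : g.getD k [] = v := PySem.Dict.getD_of_get?_eq_some g [] hv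
    have hcm : (pvMapV g).contains k = true := by rw [pvContains_mapV]; exact hc
    have hlook : (pvMapV g).getD k "" = pvPick v := by
      rw [PySem.Dict.getD_eq_get?_getD, pvGet?_mapV, hv]; rfl
    have hitems : ∀ w, (g.insert k w).items
        = g.items.map (fun p => if p.1 == k then (k, w) else p) :=
      fun w => PySem.Dict.items_insert_of_contains g w hc
    have hitemsM : ∀ w, ((pvMapV g).insert k w).items
        = (pvMapV g).items.map (fun p => if p.1 == k then (k, w) else p) :=
      fun w => PySem.Dict.items_insert_of_contains (pvMapV g) w hcm
    have hval : ∀ p ∈ g.items, p.1 = k → p.2 = v := by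
      intro p hp hpk
      have : g.get? k = some p.2 := by
        refine PySem.Dict.get?_of_mem_items g ?_ hnd
        rw [← hpk]; exact hp
      rw [hv] at this
      exact (Option.some_inj.mp this).symm
    -- common map computation: replace-at-k then pick, versus pick then replace-at-k
    have key : ∀ (w : String), pvPick (v ++ [f]) = w →
        pvMapV (g.insert k (g.getD k [] ++ [f])) = (pvMapV g).insert k w := by
      intro w hw
      apply PySem.Dict.ext
      rw [pvItems_mapV, hvD, hitems, hitemsM, pvItems_mapV, List.map_map, List.map_map]
      refine List.map_congr_left ?_
      intro p hp
      by_cases hpk : p.1 = k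
      · simp [Function.comp, hpk, hw]
      · simp [Function.comp, hpk]
    by_cases hf : PySem.Str.endswith f ".json" = true
    · rw [if_pos hf]
      exact key f (pvPick_last v f (Or.inr hf))
    · have hf' : PySem.Str.endswith f ".json" = false := by simpa using hf
      rw [if_neg hf, hlook]
      show pvMapV (g.insert k (g.getD k [] ++ [f]))
          = if (!PySem.Str.endswith (pvPick v) ".json") = true then (pvMapV g).insert k f else pvMapV g
      by_cases hj : PySem.Str.endswith (pvPick v) ".json" = true
      · -- group already has a .json file: A leaves the dict alone
        rw [hj, if_neg (by simp)]
        have hvf : (v.filter (fun g => PySem.Str.endswith g ".json")).isEmpty = false := by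
          have := pvPick_json_iff v
          rw [hj] at this
          simpa using this.symm
        apply PySem.Dict.ext
        rw [pvItems_mapV, hvD, hitems, pvItems_mapV, List.map_map]
        refine List.map_congr_left ?_
        intro p hp
        by_cases hpk : p.1 = k
        · have h2 := hval p hp hpk
          simp [Function.comp, hpk, h2, pvPick_append_not_json v f hf' hvf]
        · simp [Function.comp, hpk]
      · have hj' : PySem.Str.endswith (pvPick v) ".json" = false := by simpa using hj
        rw [hj', if_pos (by decide)]
        have hvf : (v.filter (fun g => PySem.Str.endswith g ".json")).isEmpty = true := by
          have := pvPick_json_iff v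
          rw [hj'] at this
          simpa using this.symm
        exact key f (pvPick_last v f (Or.inl hvf))
  · -- fresh key: both sides append, with value f
    have hc' : g.contains k = false := by simpa using hc
    have hcm : (pvMapV g).contains k = false := by rw [pvContains_mapV]; exact hc'
    have hgD : g.getD k [] = [] := PySem.Dict.getD_of_not_contains g [] hc'
    have hlook : (pvMapV g).getD k "" = "" := PySem.Dict.getD_of_not_contains _ "" hcm
    have key : pvMapV (g.insert k (g.getD k [] ++ [f])) = (pvMapV g).insert k f := by
      apply PySem.Dict.ext
      rw [pvItems_mapV, hgD, PySem.Dict.items_insert_of_not_contains g _ hc',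
          PySem.Dict.items_insert_of_not_contains (pvMapV g) f hcm]
      have hpf : pvPick [f] = f := by
        have := pvPick_last [] f (Or.inl (by decide))
        simpa using this
      simp [pvMapV, hpf]
    by_cases hf : PySem.Str.endswith f ".json" = true
    · rw [if_pos hf]; exact key
    · rw [if_neg hf, hlook]
      show pvMapV (g.insert k (g.getD k [] ++ [f]))
          = if (!PySem.Str.endswith "" ".json") = true then (pvMapV g).insert k f else pvMapV g
      rw [if_pos (show (!PySem.Str.endswith "" ".json") = true by decide)]
      exact key

theorem pvMain (l : List String) (g : PySem.Dict String (List String)) (hnd : g.keys.Nodup) :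
    pvMapV (l.foldl pvStepB g) = l.foldl pvStepA (pvMapV g) := by
  induction l generalizing g with
  | nil => rfl
  | cons f t ih =>
      simp only [List.foldl_cons]
      rw [← pvStep_comm g f hnd, ih]
      exact PySem.Dict.nodup_keys_insert _ _ _ hnd

theorem pvFoldl_append (l : List (List String)) (acc : List String) :
    l.foldl (fun result group => result ++ [pvPick group]) acc = acc ++ l.map pvPick := by
  induction l generalizing acc with
  | nil => simp
  | cons x t ih => simp [ih]

-- ===== VERDICT (by name: the statement is the Claim_ definition above) =====
theorem filter_upgrade_duplicates_spec : Claim_equal_filter_upgrade_duplicates := by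
  intro file_list _
  unfold Spec_filter_upgrade_duplicates filter_upgrade_duplicates filter_upgrade_duplicates_alt
  rw [pvFoldl_append]
  have h1 : (file_list.foldl (fun bases f =>
      let basekey := PySem.Str.replace f ".json" ""
      if PySem.Str.endswith f ".json" then
        bases.insert basekey f
      else
        let lookup := bases.getD basekey ""
        if !(PySem.Str.endswith lookup ".json") then bases.insert basekey f
        else bases)
    PySem.Dict.empty) = pvMapV (file_list.foldl pvStepB PySem.Dict.empty) := by
    rw [pvMain file_list PySem.Dict.empty (by simp [PySem.Dict.empty])]
    rfl
  rw [h1]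
  show (pvMapV _).values = _
  simp only [pvMapV, PySem.Dict.values, List.map_map]
  rfl
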